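-- pv_equiv track=rewrite | github.com/sm0kebamb0o/SegWordHTR | src/preprocessing.py | __make_valid_label
-- ===== SOURCE A (Python) =====
-- def __make_valid_label(label: str, max_len: int) -> str:
--     """Cuts the label so that would fit in required size in CTCLoss terms."""
--     cur_len = 1
--     for i in range(1, len(label)):
--         if label[i] == label[i - 1]:
--             # Here we are adding 2, because between same symbols
--             # there should be a special blank
--             cur_len += 2
--         else:
--             cur_len += 1
--         if cur_len > max_len:
--             return label[:i]
--     return label
-- ===== SOURCE B (Python) =====
-- def __make_valid_label(label: str, max_len: int) -> str:
--     """Cuts the label so that it fits in required size in CTCLoss terms."""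
--     # Phase 1: table of CTC lengths -- lens[i] = CTC length of label[:i+1].
--     lens = [1]
--     for i in range(1, len(label)):
--         lens.append(lens[-1] + (2 if label[i] == label[i - 1] else 1))
--     # Phase 2: first index whose CTC length exceeds max_len is the cutoff.
--     cut = next((i for i in range(1, len(label)) if lens[i] > max_len), None)
--     return label if cut is None else label[:cut]
-- ===== Notes on version B (the rewrite author's own statement) =====
-- stated objective: alternative
-- what changed: Replaces the single early-exit loop that accumulates the running CTC length with a two-phase computation: first build the full table of prefix CTC lengths, then search that table for the first index exceeding max_len.
import Mathlib
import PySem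

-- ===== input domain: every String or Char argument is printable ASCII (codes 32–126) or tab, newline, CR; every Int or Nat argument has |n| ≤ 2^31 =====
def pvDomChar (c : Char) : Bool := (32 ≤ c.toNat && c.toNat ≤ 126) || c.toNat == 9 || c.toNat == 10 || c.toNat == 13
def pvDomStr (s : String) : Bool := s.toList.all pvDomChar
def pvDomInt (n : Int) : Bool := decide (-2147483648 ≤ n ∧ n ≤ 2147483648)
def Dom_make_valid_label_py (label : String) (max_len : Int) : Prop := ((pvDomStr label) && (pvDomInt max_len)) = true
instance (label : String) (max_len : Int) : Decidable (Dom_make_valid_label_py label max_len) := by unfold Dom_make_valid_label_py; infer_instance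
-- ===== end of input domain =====

-- B replaces A's single accumulate-and-check loop with two phases (build the full
-- prefix CTC-length table, then search it for the first index over max_len); objective: alternative.


-- ===== PORT A =====
-- A's for-loop over range(1, len(label)) with its early return, as index recursion
def mvlAGo (label : String) (max_len : Int) (cs : List Char) (i : Nat) (cur : Int) : String :=
  if i < cs.length then
    let cur' := cur + (if cs.getD i ' ' = cs.getD (i - 1) ' ' then 2 else 1)
    if cur' > max_len then String.ofList (cs.take i)   -- label[:i], 0 ≤ i
    else mvlAGo label max_len cs (i + 1) cur'
  else label
termination_by cs.length - i

def make_valid_label_py (label : String) (max_len : Int) : String :=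
  mvlAGo label max_len label.toList 1 1

-- ===== PORT B =====
-- phase 1 of Source B: lens[i] = CTC length of label[:i+1], built by appending lens[-1] + incr
def mvlLens (cs : List Char) : List Int :=
  (List.range' 1 (cs.length - 1)).foldl
    (fun lens i => lens ++ [PySem.List.pyGetD lens (-1) 0 + (if cs.getD i ' ' = cs.getD (i - 1) ' ' then 2 else 1)])
    [1]

-- phase 2 of Source B: first i in range(1, len(label)) with lens[i] > max_len, else None
def make_valid_label_py_alt (label : String) (max_len : Int) : String :=
  match (List.range' 1 (label.toList.length - 1)).find?
      (fun i => decide ((mvlLens label.toList).getD i 0 > max_len)) with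
  | none => label
  | some i => String.ofList (label.toList.take i)   -- label[:cut]

-- ===== PRECONDITION & SPEC =====
def Spec_make_valid_label_py (label : String) (max_len : Int) (out : String) : Prop := out = make_valid_label_py_alt label max_len
instance (label : String) (max_len : Int) (out : String) : Decidable (Spec_make_valid_label_py label max_len out) := by unfold Spec_make_valid_label_py; infer_instance

-- ===== CLAIM (what is proved, stated in full; the proofs are below) =====
def Claim_equal_make_valid_label_py : Prop := ∀ (label : String) (max_len : Int), Dom_make_valid_label_py label max_len → Spec_make_valid_label_py label max_len (make_valid_label_py label max_len)

-- ===== LEMMAS AND PROOFS =====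

-- mathematical CTC prefix length: clen cs i = CTC length of cs.take (i+1)
def clen (cs : List Char) : Nat → Int
  | 0 => 1
  | i + 1 => clen cs i + (if cs.getD (i + 1) ' ' = cs.getD i ' ' then 2 else 1)

lemma mvlLens_eq (cs : List Char) :
    ∀ k, (List.range' 1 k).foldl
      (fun lens i => lens ++ [PySem.List.pyGetD lens (-1) 0 + (if cs.getD i ' ' = cs.getD (i - 1) ' ' then 2 else 1)])
      [1] = (List.range (k + 1)).map (clen cs) := by
  intro k
  induction k with
  | zero => simp [clen]
  | succ k ih =>
      rw [List.range'_1_concat, List.foldl_append, ih]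
      simp only [List.foldl_cons, List.foldl_nil, Nat.add_comm 1 k]
      rw [show List.map (clen cs) (List.range (k + 1))
            = List.map (clen cs) (List.range k) ++ [clen cs k] by
          rw [List.range_succ, List.map_append]; rfl]
      rw [PySem.List.pyGetD_neg_one_append_singleton]
      rw [List.range_succ (n := k + 1), List.map_append, List.range_succ (n := k), List.map_append]
      simp [clen]

lemma mvlLens_getD (cs : List Char) (i : Nat) (h : i < cs.length - 1 + 1) :
    (mvlLens cs).getD i 0 = clen cs i := by
  rw [mvlLens, mvlLens_eq]
  rw [List.getD_eq_getElem?_getD, List.getElem?_map, List.getElem?_range h]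
  rfl

lemma pvFind?_congr {α : Type} {p q : α → Bool} :
    ∀ l : List α, (∀ a ∈ l, p a = q a) → l.find? p = l.find? q := by
  intro l
  induction l with
  | nil => intro _; rfl
  | cons x xs ih =>
      intro h
      rw [List.find?_cons, List.find?_cons, h x (by simp)]
      cases hqx : q x with
      | true => rfl
      | false => exact ih fun a ha => h a (by simp [ha])

lemma mvlAGo_eq (label : String) (max_len : Int) (cs : List Char) :
    ∀ k i, i + k = cs.length → 1 ≤ i →
      mvlAGo label max_len cs i (clen cs (i - 1)) =
        match (List.range' i k).find? (fun j => decide (clen cs j > max_len)) with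
        | none => label
        | some j => String.ofList (cs.take j) := by
  intro k
  induction k with
  | zero =>
      intro i hik _
      rw [mvlAGo]
      simp [show ¬ i < cs.length by omega]
  | succ k ih =>
      intro i hik hi
      have hstep : clen cs i
          = clen cs (i - 1) + (if cs.getD i ' ' = cs.getD (i - 1) ' ' then 2 else 1) := by
        conv_lhs => rw [show i = (i - 1) + 1 by omega]
        simp [clen, show i - 1 + 1 = i by omega]
      have hrec := ih (i + 1) (by omega) (by omega)
      rw [show i + 1 - 1 = i from rfl] at hrec
      rw [mvlAGo, if_pos (show i < cs.length by omega)]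
      simp only [← hstep]
      rw [List.range'_succ, List.find?_cons]
      by_cases hgt : clen cs i > max_len
      · rw [if_pos hgt]
        simp [hgt]
      · rw [if_neg hgt, hrec]
        simp [hgt]

-- ===== VERDICT (by name: the statement is the Claim_ definition above) =====
theorem make_valid_label_py_spec : Claim_equal_make_valid_label_py := by
  intro label max_len _
  unfold Spec_make_valid_label_py make_valid_label_py make_valid_label_py_alt
  by_cases h0 : label.toList.length = 0
  · rw [mvlAGo]
    simp [h0]
  · have hfind : (List.range' 1 (label.toList.length - 1)).find?
          (fun i => decide ((mvlLens label.toList).getD i 0 > max_len))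
        = (List.range' 1 (label.toList.length - 1)).find?
          (fun j => decide (clen label.toList j > max_len)) := by
      apply pvFind?_congr
      intro a ha
      have := List.mem_range'_1.mp ha
      rw [mvlLens_getD label.toList a (by omega)]
    have hmain := mvlAGo_eq label max_len label.toList (label.toList.length - 1) 1 (by omega) le_rfl
    simp only [clen] at hmain
    rw [hmain, hfind]
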